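-- pv_equiv track=rewrite | github.com/iMotorSoft/concilia | SrvRestAstroLS_v1/services/ingest/sniff_bank.py | columns_look_like_pilaga
-- ===== SOURCE A (Python) =====
-- def columns_look_like_pilaga(cols: list[str]) -> bool:
--     up = [c.strip().upper() for c in (cols or [])]
--     has_fecha = any(c == "FECHA" or c.startswith("FECHA") for c in up)
--     has_ing = any("INGRESO" in c for c in up)
--     has_egr = any("EGRESO" in c for c in up)
--     has_acu = any("ACUMULADO" in c for c in up)
--     has_doc = any("DOCUMENTO" in c or "DOC." in c for c in up)
--     has_ben = any("BENEFICIARIO" in c for c in up)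
--     score_iea = sum([has_ing, has_egr, has_acu])
--     return has_fecha and score_iea >= 2 and (has_doc or has_ben)
-- ===== SOURCE B (Python) =====
-- def columns_look_like_pilaga(cols: list[str]) -> bool:
--     # table-driven: one pass collects a SET of matched tags via a keyword table,
--     # then the final condition is evaluated on the tag set
--     KEYWORDS = [
--         ("ING", "INGRESO"), ("EGR", "EGRESO"), ("ACU", "ACUMULADO"),
--         ("DOC", "DOCUMENTO"), ("DOC", "DOC."), ("BEN", "BENEFICIARIO"),
--     ]
--     tags = set()
--     for c in (cols or []):
--         u = c.strip().upper()
--         if u.startswith("FECHA"):  # covers u == "FECHA" too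
--             tags.add("FECHA")
--         for tag, kw in KEYWORDS:
--             if kw in u:
--                 tags.add(tag)
--     score_iea = sum(1 for t in ("ING", "EGR", "ACU") if t in tags)
--     return "FECHA" in tags and score_iea >= 2 and ("DOC" in tags or "BEN" in tags)
-- ===== Notes on version B (the rewrite author's own statement) =====
-- stated objective: alternative
-- what changed: Replaces six hard-coded any() substring scans and boolean variables with a data-driven design: a keyword-to-tag table drives a single pass that accumulates a set of matched tags, and the verdict is computed by scoring membership in that tag set.
import Mathlib
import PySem

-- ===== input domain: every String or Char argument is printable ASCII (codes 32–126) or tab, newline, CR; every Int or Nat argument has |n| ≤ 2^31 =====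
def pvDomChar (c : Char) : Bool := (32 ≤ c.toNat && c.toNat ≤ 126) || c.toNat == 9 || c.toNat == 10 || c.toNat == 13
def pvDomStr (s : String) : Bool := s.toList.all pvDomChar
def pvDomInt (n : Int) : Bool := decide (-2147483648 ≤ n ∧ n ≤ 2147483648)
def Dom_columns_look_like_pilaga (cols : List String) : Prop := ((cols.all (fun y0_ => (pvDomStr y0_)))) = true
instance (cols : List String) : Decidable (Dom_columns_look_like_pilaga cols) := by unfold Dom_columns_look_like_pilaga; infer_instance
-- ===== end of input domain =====

-- B replaces A's six hard-coded any() scans and boolean flags by a keyword-to-tag TABLE driving one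
-- pass that accumulates a SET of matched tags, scored afterwards (alternative decomposition, same cost).

-- ===== PORT A =====
def columns_look_like_pilaga (cols : List String) : Bool :=
  let up := cols.map (fun c => PySem.Str.upper (PySem.Str.strip c))
  let has_fecha := up.any (fun c => c == "FECHA" || PySem.Str.startswith c "FECHA")
  let has_ing := up.any (fun c => PySem.Str.isIn "INGRESO" c)
  let has_egr := up.any (fun c => PySem.Str.isIn "EGRESO" c)
  let has_acu := up.any (fun c => PySem.Str.isIn "ACUMULADO" c)
  let has_doc := up.any (fun c => PySem.Str.isIn "DOCUMENTO" c || PySem.Str.isIn "DOC." c)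
  let has_ben := up.any (fun c => PySem.Str.isIn "BENEFICIARIO" c)
  let score_iea : Int := (if has_ing then 1 else 0) + (if has_egr then 1 else 0) + (if has_acu then 1 else 0)
  has_fecha && decide (score_iea ≥ 2) && (has_doc || has_ben)

-- ===== PORT B =====
-- the keyword table: (tag, substring keyword)
def pilagaKeywords : List (String × String) :=
  [("ING", "INGRESO"), ("EGR", "EGRESO"), ("ACU", "ACUMULADO"),
   ("DOC", "DOCUMENTO"), ("DOC", "DOC."), ("BEN", "BENEFICIARIO")]

-- one column: add "FECHA" on prefix match, then every table tag whose keyword occurs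
def pilagaColTags (tags : PySem.Set String) (c : String) : PySem.Set String :=
  let u := PySem.Str.upper (PySem.Str.strip c)
  let tags := if PySem.Str.startswith u "FECHA" then PySem.Set.add tags "FECHA" else tags
  pilagaKeywords.foldl (fun t p => if PySem.Str.isIn p.2 u then PySem.Set.add t p.1 else t) tags

def columns_look_like_pilaga_alt (cols : List String) : Bool :=
  let tags := cols.foldl pilagaColTags PySem.Set.empty
  let score_iea : Int :=
    (((["ING", "EGR", "ACU"] : List String).filter (fun t => PySem.Set.contains tags t)).length : Int)
  PySem.Set.contains tags "FECHA" && decide (score_iea ≥ 2) &&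
    (PySem.Set.contains tags "DOC" || PySem.Set.contains tags "BEN")

-- ===== PRECONDITION & SPEC =====
def Spec_columns_look_like_pilaga (cols : List String) (out : Bool) : Prop := out = columns_look_like_pilaga_alt cols
instance (cols : List String) (out : Bool) : Decidable (Spec_columns_look_like_pilaga cols out) := by unfold Spec_columns_look_like_pilaga; infer_instance

-- ===== CLAIM (what is proved, stated in full; the proofs are below) =====
def Claim_equal_columns_look_like_pilaga : Prop := ∀ (cols : List String), Dom_columns_look_like_pilaga cols → Spec_columns_look_like_pilaga cols (columns_look_like_pilaga cols)

-- ===== LEMMAS AND PROOFS =====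
theorem mem_ite_add (t x : String) (s : PySem.Set String) (b : Bool) :
    t ∈ (if b = true then PySem.Set.add s x else s) ↔ t ∈ s ∨ (b = true ∧ t = x) := by
  cases b <;> simp [PySem.Set.mem_add]

-- which tags one column contributes: one lemma per tag literal
theorem mem_colTags_FECHA (s : PySem.Set String) (c : String) :
    "FECHA" ∈ pilagaColTags s c ↔ "FECHA" ∈ s ∨ (PySem.Str.startswith (PySem.Str.upper (PySem.Str.strip c)) "FECHA") = true := by
  simp only [pilagaColTags, pilagaKeywords, List.foldl_cons, List.foldl_nil, mem_ite_add]; simp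

theorem mem_colTags_ING (s : PySem.Set String) (c : String) :
    "ING" ∈ pilagaColTags s c ↔ "ING" ∈ s ∨ (PySem.Str.isIn "INGRESO" (PySem.Str.upper (PySem.Str.strip c))) = true := by
  simp only [pilagaColTags, pilagaKeywords, List.foldl_cons, List.foldl_nil, mem_ite_add]; simp

theorem mem_colTags_EGR (s : PySem.Set String) (c : String) :
    "EGR" ∈ pilagaColTags s c ↔ "EGR" ∈ s ∨ (PySem.Str.isIn "EGRESO" (PySem.Str.upper (PySem.Str.strip c))) = true := by
  simp only [pilagaColTags, pilagaKeywords, List.foldl_cons, List.foldl_nil, mem_ite_add]; simp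

theorem mem_colTags_ACU (s : PySem.Set String) (c : String) :
    "ACU" ∈ pilagaColTags s c ↔ "ACU" ∈ s ∨ (PySem.Str.isIn "ACUMULADO" (PySem.Str.upper (PySem.Str.strip c))) = true := by
  simp only [pilagaColTags, pilagaKeywords, List.foldl_cons, List.foldl_nil, mem_ite_add]; simp

theorem mem_colTags_DOC (s : PySem.Set String) (c : String) :
    "DOC" ∈ pilagaColTags s c ↔ "DOC" ∈ s ∨ (PySem.Str.isIn "DOCUMENTO" (PySem.Str.upper (PySem.Str.strip c)) || PySem.Str.isIn "DOC." (PySem.Str.upper (PySem.Str.strip c))) = true := by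
  simp only [pilagaColTags, pilagaKeywords, List.foldl_cons, List.foldl_nil, mem_ite_add]; simp; tauto

theorem mem_colTags_BEN (s : PySem.Set String) (c : String) :
    "BEN" ∈ pilagaColTags s c ↔ "BEN" ∈ s ∨ (PySem.Str.isIn "BENEFICIARIO" (PySem.Str.upper (PySem.Str.strip c))) = true := by
  simp only [pilagaColTags, pilagaKeywords, List.foldl_cons, List.foldl_nil, mem_ite_add]; simp

-- folding the tag collector over all columns = OR of the per-column contribution
theorem contains_foldl_colTags (t : String) (f : String → Bool)
    (ht : ∀ s c, t ∈ pilagaColTags s c ↔ t ∈ s ∨ f c = true) (cols : List String) :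
    PySem.Set.contains (cols.foldl pilagaColTags PySem.Set.empty) t = cols.any f := by
  have key : ∀ (cs : List String) (s : PySem.Set String),
      t ∈ cs.foldl pilagaColTags s ↔ t ∈ s ∨ cs.any f = true := by
    intro cs
    induction cs with
    | nil => simp
    | cons c cs ih =>
      intro s
      simp only [List.foldl_cons, List.any_cons, ih, ht, Bool.or_eq_true]
      tauto
  rw [Bool.eq_iff_iff, PySem.Set.contains_iff, key]
  simp [PySem.Set.empty]

-- A's "== FECHA or startswith FECHA" is just startswith
theorem fecha_eq_startswith (u : String) :
    (u == "FECHA" || PySem.Str.startswith u "FECHA") = PySem.Str.startswith u "FECHA" := by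
  by_cases h : u = "FECHA"
  · subst h; decide
  · simp [h]

-- ===== VERDICT (by name: the statement is the Claim_ definition above) =====
theorem columns_look_like_pilaga_spec : Claim_equal_columns_look_like_pilaga := by
  intro cols _
  unfold Spec_columns_look_like_pilaga columns_look_like_pilaga columns_look_like_pilaga_alt
  simp only [contains_foldl_colTags "FECHA" _ mem_colTags_FECHA,
    contains_foldl_colTags "ING" _ mem_colTags_ING,
    contains_foldl_colTags "EGR" _ mem_colTags_EGR,
    contains_foldl_colTags "ACU" _ mem_colTags_ACU,
    contains_foldl_colTags "DOC" _ mem_colTags_DOC,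
    contains_foldl_colTags "BEN" _ mem_colTags_BEN,
    List.any_map, Function.comp_def, fecha_eq_startswith,
    List.filter_cons, List.filter_nil]
  cases hi : cols.any (fun c => PySem.Str.isIn "INGRESO" (PySem.Str.upper (PySem.Str.strip c))) <;>
  cases he : cols.any (fun c => PySem.Str.isIn "EGRESO" (PySem.Str.upper (PySem.Str.strip c))) <;>
  cases ha : cols.any (fun c => PySem.Str.isIn "ACUMULADO" (PySem.Str.upper (PySem.Str.strip c))) <;>
  simp
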